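-- pv_equiv track=rewrite | github.com/asaparov/prontoqa | proof.py | symmetric_set_difference
-- ===== SOURCE A (Python) =====
-- def symmetric_set_difference(sets):
-- 	difference = []
-- 	for i in range(len(sets)):
-- 		difference_i = []
-- 		for element in sets[i]:
-- 			element_in_other_set = False
-- 			for j in range(len(sets)):
-- 				if i != j and element in sets[j]:
-- 					element_in_other_set = True
-- 					break
-- 			if not element_in_other_set:
-- 				difference_i.append(element)
-- 		difference.append(difference_i)
-- 	return difference
-- ===== SOURCE B (Python) =====
-- def symmetric_set_difference(sets):
-- 	count = {}
-- 	for s in sets: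
-- 		for element in set(s):
-- 			count[element] = count.get(element, 0) + 1
-- 	return [[element for element in s if count[element] == 1] for s in sets]
-- ===== Notes on version B (the rewrite author's own statement) =====
-- stated objective: faster
-- what changed: Replace the triple-nested per-element scan over all other sets by one pass that counts, in a dict, how many distinct sets contain each element, then keeps exactly the elements whose count is 1.
import Mathlib
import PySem

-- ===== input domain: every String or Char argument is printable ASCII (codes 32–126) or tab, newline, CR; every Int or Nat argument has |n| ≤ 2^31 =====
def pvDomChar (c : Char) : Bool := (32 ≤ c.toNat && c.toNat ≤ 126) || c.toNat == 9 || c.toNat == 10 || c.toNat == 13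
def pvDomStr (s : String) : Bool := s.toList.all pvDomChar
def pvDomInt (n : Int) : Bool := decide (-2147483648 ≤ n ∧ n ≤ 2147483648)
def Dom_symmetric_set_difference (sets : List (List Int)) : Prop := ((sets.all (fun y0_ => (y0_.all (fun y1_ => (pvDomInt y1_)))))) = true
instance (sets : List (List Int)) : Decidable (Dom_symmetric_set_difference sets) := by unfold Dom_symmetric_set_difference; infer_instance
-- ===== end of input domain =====

-- B replaces A's triple-nested membership scan by one counting pass over a dict
-- (distinct sets containing each element), keeping elements whose count is 1: asymptotically faster.

-- ===== PORT A =====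
-- inner 'for j in range(len(sets)): if i != j and element in sets[j]: flag = True; break'
-- (the loop with break over the remaining js; returns the flag)
def ssdScan (sets : List (List Int)) (i : Nat) (element : Int) : List Nat → Bool
  | [] => false
  | j :: js => if i ≠ j ∧ element ∈ sets.getD j [] then true else ssdScan sets i element js

def symmetric_set_difference (sets : List (List Int)) : List (List Int) :=
  (List.range sets.length).foldl (fun difference i =>
    let difference_i := (sets.getD i []).foldl (fun acc element =>
      let element_in_other_set := ssdScan sets i element (List.range sets.length)
      if ¬ element_in_other_set then acc ++ [element] else acc) []
    difference ++ [difference_i]) []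

-- ===== PORT B =====
def symmetric_set_difference_alt (sets : List (List Int)) : List (List Int) :=
  let count := sets.foldl (fun d s =>
    (PySem.Set.ofList s).foldl (fun d element => d.insert element (d.getD element 0 + 1)) d)
    (PySem.Dict.empty : PySem.Dict Int Int)
  sets.map (fun s => s.filter (fun element => count.getD element 0 == 1))

-- ===== PRECONDITION & SPEC =====
def Spec_symmetric_set_difference (sets : List (List Int)) (out : List (List Int)) : Prop := out = symmetric_set_difference_alt sets
instance (sets : List (List Int)) (out : List (List Int)) : Decidable (Spec_symmetric_set_difference sets out) := by unfold Spec_symmetric_set_difference; infer_instance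

-- ===== CLAIM (what is proved, stated in full; the proofs are below) =====
def Claim_equal_symmetric_set_difference : Prop := ∀ (sets : List (List Int)), Dom_symmetric_set_difference sets → Spec_symmetric_set_difference sets (symmetric_set_difference sets)

-- ===== LEMMAS AND PROOFS =====

-- the counting fold computes, for every element, the number of sets that contain it
theorem ssd_getD_incr (l : List Int) (d : PySem.Dict Int Int) (e : Int) :
    (l.foldl (fun d x => d.insert x (d.getD x 0 + 1)) d).getD e 0
      = d.getD e 0 + l.count e := by
  induction l generalizing d with
  | nil => simp
  | cons x xs ih =>
      simp only [List.foldl_cons, ih, List.count_cons]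
      rw [PySem.Dict.getD_insert]
      by_cases h : e = x <;> simp [h] <;> omega

theorem ssd_count_set (s : List Int) (d : PySem.Dict Int Int) (e : Int) :
    ((PySem.Set.ofList s).foldl (fun d x => d.insert x (d.getD x 0 + 1)) d).getD e 0
      = d.getD e 0 + (if e ∈ s then 1 else 0) := by
  rw [ssd_getD_incr]
  congr 1
  rcases Decidable.em (e ∈ s) with h | h
  · simp only [h, if_true]
    exact_mod_cast List.count_eq_one_of_mem (PySem.Set.nodup_ofList s)
      ((PySem.Set.mem_ofList s e).2 h)
  · simp only [h, if_false]
    exact_mod_cast List.count_eq_zero.2 (fun hm => h ((PySem.Set.mem_ofList s e).1 hm))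

theorem ssd_countD (sets : List (List Int)) (d : PySem.Dict Int Int) (e : Int) :
    (sets.foldl (fun d s =>
      (PySem.Set.ofList s).foldl (fun d x => d.insert x (d.getD x 0 + 1)) d) d).getD e 0
      = d.getD e 0 + (sets.countP (fun s => e ∈ s) : Int) := by
  induction sets generalizing d with
  | nil => simp
  | cons s ss ih =>
      simp only [List.foldl_cons, ih, ssd_count_set, List.countP_cons]
      by_cases h : e ∈ s <;> simp [h] <;> push_cast <;> ring

-- countP over the list of sets as a filter over indices
theorem ssd_countP_eq_indices (l : List (List Int)) (e : Int) :
    l.countP (fun s => e ∈ s)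
      = ((List.range l.length).filter (fun j => e ∈ l.getD j [])).length := by
  induction l with
  | nil => simp
  | cons s ss ih =>
      rw [List.countP_cons]
      simp only [List.length_cons, List.range_succ_eq_map, List.filter_cons,
        List.filter_map, List.length_map]
      by_cases h : e ∈ s <;> simp [h, ih, Function.comp_def] <;> rfl

-- A's scan is an existence test over the index list
theorem ssdScan_eq_any (sets : List (List Int)) (i : Nat) (e : Int) (js : List Nat) :
    ssdScan sets i e js = js.any (fun j => decide (i ≠ j ∧ e ∈ sets.getD j [])) := by
  induction js with
  | nil => rfl
  | cons j js ih =>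
      simp only [ssdScan, List.any_cons, ← ih]
      by_cases h : i ≠ j ∧ e ∈ sets.getD j [] <;> simp [h]

-- the per-element conditions agree for an element of sets[i]
theorem ssd_cond (sets : List (List Int)) (i : Nat) (hi : i < sets.length) (e : Int)
    (he : e ∈ sets.getD i []) :
    (ssdScan sets i e (List.range sets.length) = false)
      ↔ sets.countP (fun s => e ∈ s) = 1 := by
  rw [ssdScan_eq_any, ssd_countP_eq_indices]
  have hmemF : ∀ j, j ∈ (List.range sets.length).filter (fun j => e ∈ sets.getD j [])
      ↔ (j < sets.length ∧ e ∈ sets.getD j []) := by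
    intro j; simp [List.mem_filter]
  have hiF : i ∈ (List.range sets.length).filter (fun j => e ∈ sets.getD j []) :=
    (hmemF i).2 ⟨hi, he⟩
  have hnd : ((List.range sets.length).filter (fun j => e ∈ sets.getD j [])).Nodup :=
    List.Nodup.filter _ List.nodup_range
  have hscan : ((List.range sets.length).any
        (fun j => decide (i ≠ j ∧ e ∈ sets.getD j [])) = false)
      ↔ ∀ j ∈ (List.range sets.length).filter (fun j => e ∈ sets.getD j []), j = i := by
    rw [List.any_eq_false]
    constructor
    · intro h j hj
      rcases (hmemF j).1 hj with ⟨hjn, hje⟩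
      have := h j (List.mem_range.2 hjn)
      by_contra hne
      exact this (by simpa using And.intro (Ne.symm hne) hje)
    · intro h j _hj
      simp only [decide_eq_true_eq, not_and]
      intro hne hje
      exact hne (h j ((hmemF j).2 ⟨by simpa using List.mem_range.1 _hj, hje⟩)).symm
  rw [hscan]
  constructor
  · intro h
    have hcount : ((List.range sets.length).filter (fun j => e ∈ sets.getD j [])).count i
        = ((List.range sets.length).filter (fun j => e ∈ sets.getD j [])).length :=
      List.count_eq_length.2 (fun b hb => ((h b hb) ▸ rfl))
    have hle := List.nodup_iff_count_le_one.1 hnd i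
    have hpos := List.count_pos_iff.2 hiF
    omega
  · intro h j hj
    rcases List.length_eq_one_iff.1 h with ⟨a, ha⟩
    rw [ha] at hiF hj
    simp only [List.mem_singleton] at hiF hj
    omega

-- accumulator lemmas for A's output-building folds
theorem ssd_foldl_filter (l : List Int) (p : Int → Bool) (acc : List Int) :
    l.foldl (fun acc e => if ¬ p e then acc ++ [e] else acc) acc
      = acc ++ l.filter (fun e => ! p e) := by
  induction l generalizing acc with
  | nil => simp
  | cons x xs ih =>
      simp only [List.foldl_cons]
      by_cases h : p x
      · rw [if_neg (by simp [h]), ih]; simp [List.filter_cons, h]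
      · rw [if_pos (by simp [h]), ih]; simp [List.filter_cons, h]

theorem ssd_foldl_map {α β : Type} (l : List α) (g : α → List β) (acc : List (List β)) :
    l.foldl (fun acc x => acc ++ [g x]) acc = acc ++ l.map g := by
  induction l generalizing acc with
  | nil => simp
  | cons x xs ih => simp [ih]

-- ===== VERDICT (by name: the statement is the Claim_ definition above) =====
theorem symmetric_set_difference_spec : Claim_equal_symmetric_set_difference := by
  intro sets _
  unfold Spec_symmetric_set_difference symmetric_set_difference symmetric_set_difference_alt
  simp only [ssd_foldl_filter, ssd_foldl_map, List.nil_append]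
  apply List.ext_getElem
  · simp
  · intro i hi1 hi2
    have hin : i < sets.length := by simpa using hi2
    simp only [List.getElem_map, List.getElem_range, List.length_range] at *
    have hgd : sets.getD i [] = sets[i]'hin := by
      simp [List.getD_eq_getElem?_getD, List.getElem?_eq_getElem hin]
    rw [hgd]
    apply List.filter_congr
    intro e he
    have hcond := ssd_cond sets i hin e (by rw [hgd]; exact he)
    have hcnt : (sets.foldl (fun d s =>
        (PySem.Set.ofList s).foldl (fun d element => d.insert element (d.getD element 0 + 1)) d)
        (PySem.Dict.empty : PySem.Dict Int Int)).getD e 0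
        = (sets.countP (fun s => e ∈ s) : Int) := by
      rw [ssd_countD]; simp [PySem.Dict.getD, PySem.Dict.get?, PySem.Dict.empty]
    rw [hcnt]
    rcases Bool.eq_false_or_eq_true (ssdScan sets i e (List.range sets.length)) with hs | hs
    · have hne : sets.countP (fun s => e ∈ s) ≠ 1 := by
        intro hc
        have := hcond.2 hc
        rw [hs] at this
        exact absurd this (by simp)
      have hb : ((sets.countP (fun s => e ∈ s) : Int) == 1) = false := by
        simpa using fun hc => hne (by exact_mod_cast hc)
      simp [hs, hb]
    · have := hcond.1 hs
      simp [hs, this]
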